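-- pv_equiv track=rewrite | github.com/osouthgate/agent-plus | agent-plus-meta/test/test_installer_skill.py | _parse_frontmatter_keys
-- ===== SOURCE A (Python) =====
-- def _parse_frontmatter_keys(block: str) -> dict[str, str]:
--     """Extract top-level `key: value` pairs. Multiline `|` blocks are folded
--     into a single string keyed by the first line. Good enough for the four
--     keys this skill ships with — no nested mappings, no flow lists."""
--     out: dict[str, str] = {}
--     current_key: str | None = None
--     current_lines: list[str] = []
--     for line in block.splitlines():
--         if not line:
--             if current_key is not None:
--                 current_lines.append("")
--             continue
--         # New top-level key only if the line has no leading whitespace AND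
--         # contains a colon before any space.
--         if not line.startswith((" ", "\t")) and ":" in line:
--             if current_key is not None:
--                 out[current_key] = "\n".join(current_lines).strip()
--             key, _, val = line.partition(":")
--             current_key = key.strip()
--             val = val.strip()
--             if val == "|":
--                 current_lines = []
--             else:
--                 current_lines = [val]
--         else:
--             current_lines.append(line.strip())
--     if current_key is not None:
--         out[current_key] = "\n".join(current_lines).strip()
--     return out
-- ===== SOURCE B (Python) =====
-- def _parse_frontmatter_keys(block: str) -> dict[str, str]:
--     """Segment-based rewrite: drop lines before the first header, then chunk
--     the remaining lines into (header, continuation-lines) segments and fold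
--     each segment into the dict."""
--     lines = block.splitlines()
--
--     def is_header(line: str) -> bool:
--         return bool(line) and not line.startswith((" ", "\t")) and ":" in line
--
--     # everything before the first top-level `key:` line is discarded
--     while lines and not is_header(lines[0]):
--         lines = lines[1:]
--
--     out: dict[str, str] = {}
--     i = 0
--     n = len(lines)
--     while i < n:
--         key, _, val = lines[i].partition(":")
--         val = val.strip()
--         body = [] if val == "|" else [val]
--         j = i + 1
--         while j < n and not is_header(lines[j]):
--             body.append(lines[j].strip())
--             j += 1
--         out[key.strip()] = "\n".join(body).strip()
--         i = j
--     return out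
-- ===== Notes on version B (the rewrite author's own statement) =====
-- stated objective: alternative
-- what changed: Replaces A's single stateful accumulator loop (current_key/current_lines carried across lines with a flush at each new header and at the end) by a two-phase segment decomposition: drop lines before the first header, then chunk the lines into header-led segments and emit each segment's joined value directly.
import Mathlib
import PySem

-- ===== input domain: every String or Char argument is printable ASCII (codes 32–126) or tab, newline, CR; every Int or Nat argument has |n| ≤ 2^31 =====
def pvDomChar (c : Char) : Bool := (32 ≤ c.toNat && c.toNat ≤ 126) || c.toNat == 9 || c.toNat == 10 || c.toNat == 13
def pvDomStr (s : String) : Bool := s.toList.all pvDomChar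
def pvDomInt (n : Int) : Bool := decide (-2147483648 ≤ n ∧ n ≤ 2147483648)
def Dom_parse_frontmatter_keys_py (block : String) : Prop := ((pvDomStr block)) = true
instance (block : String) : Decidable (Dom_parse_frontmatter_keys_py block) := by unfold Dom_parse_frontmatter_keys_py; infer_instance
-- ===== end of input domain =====

-- B replaces A's stateful accumulator loop by a drop-prefix + header-led-segment decomposition; return values are proved equal.

-- hand port of line.partition(":") (one-char separator): exact — when ':' is absent Python
-- returns (line, "", "") and this returns (line, ""), the same (key, val) pair A/B destructure.
def pvPartitionColon : List Char → List Char × List Char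
  | [] => ([], [])
  | c :: rest =>
      if c = ':' then ([], rest)
      else
        let p := pvPartitionColon rest
        (c :: p.1, p.2)

-- ===== PORT A =====
-- one step of A's for-loop; state = (out, current_key, current_lines)
def pvStepA (st : PySem.Dict String String × Option String × List String) (line : String) :
    PySem.Dict String String × Option String × List String :=
  if line = "" then
    match st.2.1 with
    | some _ => (st.1, st.2.1, st.2.2 ++ [""])
    | none => st
  else if !(PySem.Str.startswith line " " || PySem.Str.startswith line "\t")
          && PySem.Str.isIn ":" line then
    let out' :=
      match st.2.1 with
      | some k => st.1.insert k (PySem.Str.strip (PySem.Str.join "\n" st.2.2))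
      | none => st.1
    let p := pvPartitionColon line.toList
    let key := PySem.Str.strip (String.ofList p.1)
    let val := PySem.Str.strip (String.ofList p.2)
    (out', some key, if val = "|" then [] else [val])
  else
    (st.1, st.2.1, st.2.2 ++ [PySem.Str.strip line])

-- final flush after the loop
def pvFinalA (st : PySem.Dict String String × Option String × List String) :
    PySem.Dict String String :=
  match st.2.1 with
  | some k => st.1.insert k (PySem.Str.strip (PySem.Str.join "\n" st.2.2))
  | none => st.1

def parse_frontmatter_keys_py (block : String) : List (String × String) :=
  (pvFinalA ((PySem.Str.splitlines block).foldl pvStepA (PySem.Dict.empty, none, []))).items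

-- ===== PORT B =====
def pvIsHeader (line : String) : Bool :=
  !(line == "") && !(PySem.Str.startswith line " " || PySem.Str.startswith line "\t")
    && PySem.Str.isIn ":" line

-- inner while loop of B: collect stripped continuation lines until the next header
def pvTakeBody : List String → List String × List String
  | [] => ([], [])
  | l :: rest =>
      if pvIsHeader l then ([], l :: rest)
      else
        let p := pvTakeBody rest
        (PySem.Str.strip l :: p.1, p.2)

theorem pvTakeBody_len : ∀ (ls : List String), (pvTakeBody ls).2.length ≤ ls.length := by
  intro ls
  induction ls with
  | nil => simp [pvTakeBody]
  | cons l rest ih =>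
      simp only [pvTakeBody]
      split
      · simp
      · simpa using Nat.le_succ_of_le ih

-- outer while loop of B: one iteration per header-led segment
def pvSegs (d : PySem.Dict String String) : List String → PySem.Dict String String
  | [] => d
  | l :: rest =>
      let p := pvPartitionColon l.toList
      let val := PySem.Str.strip (String.ofList p.2)
      let b := pvTakeBody rest
      let vs := (if val = "|" then [] else [val]) ++ b.1
      pvSegs (d.insert (PySem.Str.strip (String.ofList p.1))
                (PySem.Str.strip (PySem.Str.join "\n" vs))) b.2
  termination_by ls => ls.length
  decreasing_by
    exact Nat.lt_succ_of_le (pvTakeBody_len rest)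

def parse_frontmatter_keys_py_alt (block : String) : List (String × String) :=
  (pvSegs PySem.Dict.empty
      ((PySem.Str.splitlines block).dropWhile (fun l => !pvIsHeader l))).items

-- ===== PRECONDITION & SPEC =====
def Spec_parse_frontmatter_keys_py (block : String) (out : List (String × String)) : Prop := out = parse_frontmatter_keys_py_alt block
instance (block : String) (out : List (String × String)) : Decidable (Spec_parse_frontmatter_keys_py block out) := by unfold Spec_parse_frontmatter_keys_py; infer_instance

-- ===== CLAIM (what is proved, stated in full; the proofs are below) =====
def Claim_equal_parse_frontmatter_keys_py : Prop := ∀ (block : String), Dom_parse_frontmatter_keys_py block → Spec_parse_frontmatter_keys_py block (parse_frontmatter_keys_py block)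

-- ===== LEMMAS AND PROOFS =====

theorem pvIsHeader_empty : pvIsHeader "" = false := by decide

theorem strip_empty : PySem.Str.strip "" = "" := by decide

-- A's loop from an active-key state = one segment of B
theorem loop_some (lines : List String) :
    ∀ (d : PySem.Dict String String) (k : String) (cl : List String),
      pvFinalA (lines.foldl pvStepA (d, some k, cl)) =
        pvSegs (d.insert k
            (PySem.Str.strip (PySem.Str.join "\n" (cl ++ (pvTakeBody lines).1))))
          (pvTakeBody lines).2 := by
  induction lines with
  | nil => intro d k cl; simp [pvTakeBody, pvFinalA, pvSegs]
  | cons l rest ih =>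
      intro d k cl
      by_cases hl : l = ""
      · subst hl
        have h1 : pvStepA (d, some k, cl) "" = (d, some k, cl ++ [""]) := by
          simp [pvStepA]
        rw [List.foldl_cons, h1, ih]
        simp [pvTakeBody, pvIsHeader_empty, strip_empty]
      · by_cases hh : (!(PySem.Str.startswith l " " || PySem.Str.startswith l "\t")
            && PySem.Str.isIn ":" l) = true
        · -- header line: A flushes and restarts; B closes the segment here
          have hhead : pvIsHeader l = true := by
            unfold pvIsHeader
            rw [beq_eq_false_iff_ne.mpr hl]
            simpa using hh
          have h1 : pvStepA (d, some k, cl) l =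
              (d.insert k (PySem.Str.strip (PySem.Str.join "\n" cl)),
               some (PySem.Str.strip (String.ofList (pvPartitionColon l.toList).1)),
               if PySem.Str.strip (String.ofList (pvPartitionColon l.toList).2) = "|"
               then [] else [PySem.Str.strip (String.ofList (pvPartitionColon l.toList).2)]) := by
            unfold pvStepA
            rw [if_neg hl, if_pos hh]
          rw [List.foldl_cons, h1, ih]
          have h2 : pvTakeBody (l :: rest) = ([], l :: rest) := by
            simp [pvTakeBody, hhead]
          rw [h2]
          simp [pvSegs]
        · -- continuation line
          have hhead : pvIsHeader l = false := by
            unfold pvIsHeader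
            rw [beq_eq_false_iff_ne.mpr hl]
            simp only [Bool.not_false, Bool.true_and]
            exact Bool.eq_false_iff.mpr hh
          have h1 : pvStepA (d, some k, cl) l = (d, some k, cl ++ [PySem.Str.strip l]) := by
            unfold pvStepA
            rw [if_neg hl, if_neg hh]
          rw [List.foldl_cons, h1, ih]
          simp [pvTakeBody, hhead]

-- A's loop before the first header = B's dropWhile prefix
theorem loop_none (lines : List String) :
    ∀ (d : PySem.Dict String String) (cl : List String),
      pvFinalA (lines.foldl pvStepA (d, none, cl)) =
        pvSegs d (lines.dropWhile (fun l => !pvIsHeader l)) := by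
  induction lines with
  | nil => intro d cl; simp [pvFinalA, pvSegs]
  | cons l rest ih =>
      intro d cl
      by_cases hl : l = ""
      · subst hl
        have h1 : pvStepA (d, none, cl) "" = (d, none, cl) := by simp [pvStepA]
        rw [List.foldl_cons, h1, ih]
        simp [List.dropWhile, pvIsHeader_empty]
      · by_cases hh : (!(PySem.Str.startswith l " " || PySem.Str.startswith l "\t")
            && PySem.Str.isIn ":" l) = true
        · have hhead : pvIsHeader l = true := by
            simp [pvIsHeader, hl, Bool.and_eq_true] at hh ⊢
            exact hh
          have h1 : pvStepA (d, none, cl) l =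
              (d, some (PySem.Str.strip (String.ofList (pvPartitionColon l.toList).1)),
               if PySem.Str.strip (String.ofList (pvPartitionColon l.toList).2) = "|"
               then [] else [PySem.Str.strip (String.ofList (pvPartitionColon l.toList).2)]) := by
            unfold pvStepA
            rw [if_neg hl, if_pos hh]
          rw [List.foldl_cons, h1, loop_some]
          have h2 : (l :: rest).dropWhile (fun l => !pvIsHeader l) = l :: rest := by
            simp [List.dropWhile, hhead]
          rw [h2]
          simp [pvSegs]
        · have hhead : pvIsHeader l = false := by
            unfold pvIsHeader
            rw [beq_eq_false_iff_ne.mpr hl]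
            simp only [Bool.not_false, Bool.true_and]
            exact Bool.eq_false_iff.mpr hh
          have h1 : pvStepA (d, none, cl) l = (d, none, cl ++ [PySem.Str.strip l]) := by
            unfold pvStepA
            rw [if_neg hl, if_neg hh]
          rw [List.foldl_cons, h1, ih]
          simp [List.dropWhile, hhead]

-- ===== VERDICT (by name: the statement is the Claim_ definition above) =====
theorem parse_frontmatter_keys_py_spec : Claim_equal_parse_frontmatter_keys_py := by
  intro block _
  unfold Spec_parse_frontmatter_keys_py parse_frontmatter_keys_py parse_frontmatter_keys_py_alt
  rw [loop_none]
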